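-- pv_equiv track=rewrite | github.com/mazlumunay/api-predictor | app/ml_layer/trainer.py | _calculate_same_method_streak
-- ===== SOURCE A (Python) =====
-- from typing import List, Dict, Any, Tuple
--
-- def _calculate_same_method_streak(events: List[Dict]) -> int:
--     """Calculate streak of same HTTP method"""
--     if not events:
--         return 0
--
--     last_method = events[-1]['method']
--     streak = 1
--
--     for i in range(len(events) - 2, -1, -1):
--         if events[i]['method'] == last_method:
--             streak += 1
--         else:
--             break
--
--     return streak
-- ===== SOURCE B (Python) =====
-- def _calculate_same_method_streak(events):
--     """Calculate streak of same HTTP method (single forward pass over run lengths)"""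
--     streak = 0
--     current = None
--     for event in events:
--         method = event['method']
--         if streak and method == current:
--             streak += 1
--         else:
--             current = method
--             streak = 1
--     return streak
-- ===== Notes on version B (the rewrite author's own statement) =====
-- stated objective: alternative
-- what changed: Replaces the backward index scan with break by a single forward pass that maintains the current run's method and length, the trailing run's length being left at the end.
-- outside the precondition, e.g. on _calculate_same_method_streak([{'x': '1'}, {'method': 'B'}, {'method': 'A'}]): A returns 1, B raises KeyError
import Mathlib
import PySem

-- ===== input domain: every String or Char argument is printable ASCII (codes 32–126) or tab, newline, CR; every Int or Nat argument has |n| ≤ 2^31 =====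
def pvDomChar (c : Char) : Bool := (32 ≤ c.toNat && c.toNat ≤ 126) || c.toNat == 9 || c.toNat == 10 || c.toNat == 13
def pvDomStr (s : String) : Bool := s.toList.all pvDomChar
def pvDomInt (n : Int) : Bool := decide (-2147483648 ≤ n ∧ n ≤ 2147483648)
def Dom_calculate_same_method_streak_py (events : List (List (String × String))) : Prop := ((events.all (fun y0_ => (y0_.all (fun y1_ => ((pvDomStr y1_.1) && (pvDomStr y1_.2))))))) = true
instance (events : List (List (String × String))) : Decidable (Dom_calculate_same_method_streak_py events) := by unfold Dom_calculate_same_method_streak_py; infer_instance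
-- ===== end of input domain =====

-- B replaces A's backward scan-with-break by a single forward pass keeping the current run's
-- method and length (objective: alternative decomposition; same asymptotic cost).

-- ===== PORT A =====
-- events[i]['method'] : first-match lookup; 'none' is Python's KeyError, excluded by Pre_
-- (the 'none' branches below are unreachable under Pre_).
def pvMethodA (e : List (String × String)) : Option String :=
  (PySem.Dict.mk e).get? "method"

-- the loop 'for i in range(len(events)-2, -1, -1)': fuel k+1 means current index is k
def pvALoop (events : List (List (String × String))) (last : String) : Nat → Int → Int
  | 0, streak => streak
  | k + 1, streak =>
      match pvMethodA (events.getD k []) with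
      | none => streak          -- Python raises KeyError here; outside Pre_
      | some m => if m = last then pvALoop events last k (streak + 1) else streak

def calculate_same_method_streak_py (events : List (List (String × String))) : Int :=
  if events = [] then 0
  else
    match pvMethodA (PySem.List.pyGetD events (-1) []) with
    | none => 0                 -- Python raises KeyError here; outside Pre_
    | some last_method => pvALoop events last_method (events.length - 1) 1

-- ===== PORT B =====
def pvBLoop : List (List (String × String)) → Option String → Int → Int
  | [], _, streak => streak
  | e :: rest, current, streak =>
      match (PySem.Dict.mk e).get? "method" with
      | none => streak          -- Python raises KeyError here; outside Pre_
      | some method =>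
          if streak ≠ 0 ∧ some method = current then pvBLoop rest current (streak + 1)
          else pvBLoop rest (some method) 1

def calculate_same_method_streak_py_alt (events : List (List (String × String))) : Int :=
  pvBLoop events none 0

-- ===== PRECONDITION & SPEC =====
-- Pre_ excludes events lists containing a dict without a 'method' key: on those both Pythons
-- may raise KeyError (B reads every event's method; A reads the trailing ones and so may still
-- return on some of them, while B raises — see the cite in the claim).
def Pre_calculate_same_method_streak_py (events : List (List (String × String))) : Prop :=
  ∀ e ∈ events, ((PySem.Dict.mk e).get? "method").isSome
instance (events : List (List (String × String))) : Decidable (Pre_calculate_same_method_streak_py events) := by unfold Pre_calculate_same_method_streak_py; infer_instance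

def pvWitness_calculate_same_method_streak_py : (List (List (String × String))) :=
  [[("method", "GET")], [("method", "GET")], [("method", "POST")]]

def Spec_calculate_same_method_streak_py (events : List (List (String × String))) (out : Int) : Prop := out = calculate_same_method_streak_py_alt events
instance (events : List (List (String × String))) (out : Int) : Decidable (Spec_calculate_same_method_streak_py events out) := by unfold Spec_calculate_same_method_streak_py; infer_instance

-- ===== CLAIM (what is proved, stated in full; the proofs are below) =====
def Claim_equal_calculate_same_method_streak_py : Prop := ∀ (events : List (List (String × String))), Dom_calculate_same_method_streak_py events → Pre_calculate_same_method_streak_py events → Spec_calculate_same_method_streak_py events (calculate_same_method_streak_py events)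

-- ===== LEMMAS AND PROOFS =====

-- the method of an event, under Pre_
def pvM (e : List (String × String)) : String :=
  ((PySem.Dict.mk e).get? "method").getD ""

-- length of the run of x at the front of l
def pvRun (x : String) (l : List String) : Int := ((l.takeWhile (· == x)).length : Int)

-- trailing-run length, reading the REVERSED method list
def pvR : List String → Int
  | [] => 0
  | x :: xs => 1 + pvRun x xs

lemma pvMethodA_eq (e : List (String × String))
    (h : ((PySem.Dict.mk e).get? "method").isSome) : pvMethodA e = some (pvM e) := by
  unfold pvMethodA pvM
  cases hx : (PySem.Dict.mk e).get? "method" with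
  | none => simp [hx] at h
  | some v => simp

lemma pvR_snoc (l : List String) (x : String) :
    pvR (l.reverse ++ [x]) = if l.all (· == x) then (l.length : Int) + 1 else pvR l.reverse := by
  by_cases hall : l.all (· == x)
  · have hrep : l = List.replicate l.length x := by
      apply List.eq_replicate_of_mem
      intro b hb
      simpa using (List.all_eq_true.mp hall b hb)
    rw [if_pos hall]
    conv_lhs => rw [hrep]
    rw [List.reverse_replicate, ← List.replicate_succ', List.replicate_succ]
    simp [pvR, pvRun]
    omega
  · rw [if_neg hall]
    -- some element of l differs from x, so the run at the head of l.reverse ends inside l.reverse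
    obtain ⟨a, ha, hax⟩ : ∃ a ∈ l, ¬ (a == x) = true := by
      by_contra hc
      push Not at hc
      exact hall (List.all_eq_true.mpr hc)
    cases hrv : l.reverse with
    | nil =>
        have : l = [] := by simpa using congrArg List.reverse hrv
        subst this; simp at ha
    | cons h t =>
        simp only [List.cons_append, pvR, pvRun]
        congr 2
        rw [List.takeWhile_append]
        by_cases hlen : (t.takeWhile (· == h)).length = t.length
        · -- then every element of t equals h; since a ∈ l and a ≠ x, necessarily h ≠ x,
          -- so the appended [x] contributes nothing
          have htall : ∀ b ∈ t, (b == h) = true := by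
            have := (List.takeWhile_prefix (l := t) (p := (· == h))).eq_of_length hlen
            exact fun b hb => List.takeWhile_eq_self_iff.mp this b hb
          have hmem : a ∈ h :: t := by
            have : a ∈ l.reverse := List.mem_reverse.mpr ha
            rwa [hrv] at this
          have hhx : h ≠ x := by
            rcases List.mem_cons.mp hmem with rfl | hat
            · exact fun hh => hax (by simp [hh])
            · have hah : a = h := by simpa using htall a hat
              exact fun hh => hax (by simp [hah, hh])
          have hxh : (x == h) = false := beq_eq_false_iff_ne.mpr (Ne.symm hhx)
          simp [hlen, List.takeWhile, hxh]
        · simp [hlen]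

-- A's loop over fuel k visits indices k-1 … 0, i.e. the reversed prefix of length k
lemma pvALoop_eq (events : List (List (String × String)))
    (hpre : Pre_calculate_same_method_streak_py events) (last : String) :
    ∀ (k : Nat), k ≤ events.length → ∀ (s : Int),
      pvALoop events last k s = s + pvRun last (((events.take k).map pvM).reverse) := by
  intro k
  induction k with
  | zero => intro _ s; simp [pvALoop, pvRun]
  | succ k ih =>
      intro hk s
      have hklt : k < events.length := by omega
      have hget : events.getD k [] = events[k] := by
        simp [List.getD_eq_getElem?_getD, List.getElem?_eq_getElem hklt]
      have hm : pvMethodA (events.getD k []) = some (pvM events[k]) := by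
        rw [hget]; exact pvMethodA_eq _ (hpre _ (List.getElem_mem hklt))
      have htake : events.take (k + 1) = events.take k ++ [events[k]] :=
        List.take_succ_eq_append_getElem hklt
      rw [htake]
      simp only [pvALoop, hm, List.map_append, List.map_cons, List.map_nil,
        List.reverse_append, List.reverse_cons, List.reverse_nil, List.nil_append,
        List.cons_append, pvRun, List.takeWhile]
      by_cases he : pvM events[k] = last
      · have : (pvM events[k] == last) = true := by simpa using he
        rw [if_pos he, ih (by omega) (s + 1)]
        simp [this, pvRun]
        ring
      · have : (pvM events[k] == last) = false := by simpa using he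
        rw [if_neg he]
        simp [this]

lemma pvA_eq_R (events : List (List (String × String)))
    (hpre : Pre_calculate_same_method_streak_py events) :
    calculate_same_method_streak_py events = pvR ((events.map pvM).reverse) := by
  unfold calculate_same_method_streak_py
  cases hev : events with
  | nil => simp [pvR]
  | cons e rest =>
      rw [← hev]
      have hne : events ≠ [] := by simp [hev]
      rw [if_neg hne]
      have hlast : PySem.List.pyGetD events (-1) [] = events.getLast hne :=
        PySem.List.pyGetD_neg_one events [] hne
      have hmem : events.getLast hne ∈ events := List.getLast_mem hne
      rw [hlast, pvMethodA_eq _ (hpre _ hmem)]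
      show pvALoop events (pvM (events.getLast hne)) (events.length - 1) 1 =
        pvR ((events.map pvM).reverse)
      rw [pvALoop_eq events hpre _ (events.length - 1) (by omega) 1]
      -- events = dropLast ++ [getLast]; take (len-1) = dropLast
      have hdl : events.take (events.length - 1) = events.dropLast := by
        rw [List.dropLast_eq_take]
      conv_rhs => rw [← List.dropLast_append_getLast hne]
      rw [hdl]
      simp [pvR, add_comm]

-- B's loop, once a run has started, is pvR of (run so far ++ rest)
lemma pvBLoop_eq (events : List (List (String × String))) :
    ∀ (c : String) (s : Int),
      Pre_calculate_same_method_streak_py events → 1 ≤ s →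
      pvBLoop events (some c) s =
        if (events.map pvM).all (· == c) then s + (events.length : Int)
        else pvR ((events.map pvM).reverse) := by
  induction events with
  | nil => intro c s _ _; simp [pvBLoop]
  | cons e rest ih =>
      intro c s hpre hs
      have hpre' : Pre_calculate_same_method_streak_py rest := by
        intro x hx; exact hpre x (List.mem_cons_of_mem _ hx)
      have hm : (PySem.Dict.mk e).get? "method" = some (pvM e) :=
        pvMethodA_eq e (hpre e List.mem_cons_self)
      have hsne : s ≠ 0 := by omega
      simp only [pvBLoop, hm]
      by_cases hec : pvM e = c
      · subst hec
        rw [if_pos ⟨hsne, rfl⟩, ih (pvM e) (s + 1) hpre' (by omega)]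
        simp only [List.map_cons, List.reverse_cons, List.all_cons, BEq.rfl, Bool.true_and]
        rw [pvR_snoc]
        by_cases hall : (rest.map pvM).all (· == pvM e)
        · simp only [if_pos hall, List.length_map, List.length_cons]
          push_cast; ring
        · simp only [if_neg hall]
      · have hne : ¬ (s ≠ 0 ∧ some (pvM e) = some c) := by
          intro hcon; exact hec (by simpa using hcon.2)
        rw [if_neg hne, ih (pvM e) 1 hpre' le_rfl]
        have hfalse : ¬ ((e :: rest).map pvM).all (· == c) = true := by
          simp only [List.map_cons, List.all_cons, Bool.and_eq_true, not_and']
          intro _; simpa using hec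
        rw [if_neg hfalse]
        simp only [List.map_cons, List.reverse_cons]
        rw [pvR_snoc (rest.map pvM) (pvM e)]
        by_cases hall : (rest.map pvM).all (· == pvM e)
        · simp only [if_pos hall, List.length_map]
          ring
        · simp only [if_neg hall]

lemma pvB_eq_R (events : List (List (String × String)))
    (hpre : Pre_calculate_same_method_streak_py events) :
    calculate_same_method_streak_py_alt events = pvR ((events.map pvM).reverse) := by
  unfold calculate_same_method_streak_py_alt
  cases events with
  | nil => simp [pvBLoop, pvR]
  | cons e rest =>
      have hpre' : Pre_calculate_same_method_streak_py rest := by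
        intro x hx; exact hpre x (List.mem_cons_of_mem _ hx)
      have hm : (PySem.Dict.mk e).get? "method" = some (pvM e) :=
        pvMethodA_eq e (hpre e List.mem_cons_self)
      simp only [pvBLoop, hm]
      rw [if_neg (by simp)]
      rw [pvBLoop_eq rest (pvM e) 1 hpre' le_rfl]
      simp only [List.map_cons, List.reverse_cons]
      rw [pvR_snoc (rest.map pvM) (pvM e)]
      by_cases hall : (rest.map pvM).all (· == pvM e)
      · simp only [if_pos hall, List.length_map]
        ring
      · simp only [if_neg hall]

-- ===== VERDICT (by name: the statement is the Claim_ definition above) =====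
theorem calculate_same_method_streak_py_spec : Claim_equal_calculate_same_method_streak_py := by
  intro events _ hpre
  unfold Spec_calculate_same_method_streak_py
  rw [pvA_eq_R events hpre, pvB_eq_R events hpre]
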